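-- pv_equiv track=rewrite | github.com/GafferHQ/gaffer | python/GafferSceneUI/_SceneViewInspector.py | sole
-- ===== SOURCE A (Python) =====
-- def sole( sequence ) :
--
-- 	result = None
-- 	for i, v in enumerate( sequence ) :
-- 		if i == 0 :
-- 			result = v
-- 		elif v != result :
-- 			return None
--
-- 	return result
-- ===== SOURCE B (Python) =====
-- from itertools import groupby
--
-- def sole(sequence):
--     groups = [k for k, _ in groupby(sequence)]
--     if len(groups) == 1:
--         return groups[0]
--     return None
-- ===== Notes on version B (the rewrite author's own statement) =====
-- stated objective: idiomatic
-- what changed: Replaced the indexed compare-to-first loop with an itertools.groupby decomposition: collapse consecutive-equal runs and return the sole group key if exactly one group exists, else None.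
import Mathlib
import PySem

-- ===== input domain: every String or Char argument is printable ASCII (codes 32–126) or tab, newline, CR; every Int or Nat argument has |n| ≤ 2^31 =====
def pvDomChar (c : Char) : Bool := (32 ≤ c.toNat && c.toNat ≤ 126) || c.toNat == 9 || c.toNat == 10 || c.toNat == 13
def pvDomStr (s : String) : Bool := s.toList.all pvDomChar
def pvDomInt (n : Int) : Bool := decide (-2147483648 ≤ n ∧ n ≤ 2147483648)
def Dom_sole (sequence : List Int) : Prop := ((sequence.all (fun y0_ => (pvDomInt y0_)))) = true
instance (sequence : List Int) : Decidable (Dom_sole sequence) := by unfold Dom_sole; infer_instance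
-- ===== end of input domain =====

-- B replaces A's indexed compare-to-first loop with a groupby decomposition (collapse runs, inspect group count); objective: idiomatic.

-- ===== PORT A =====
-- the enumerate-loop: index i and running result (None before the first element)
def soleGo (xs : List Int) (i : Nat) (result : Option Int) : Option Int :=
  match xs with
  | [] => result
  | v :: rest =>
    if i = 0 then soleGo rest (i + 1) (some v)
    else if some v ≠ result then none
    else soleGo rest (i + 1) result

def sole (sequence : List Int) : Option Int :=
  soleGo sequence 0 none

-- ===== PORT B =====
-- keys of itertools.groupby: collapse runs of consecutive equal elements
def groupKeys : List Int → List Int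
  | [] => []
  | [x] => [x]
  | x :: y :: ys => if x = y then groupKeys (y :: ys) else x :: groupKeys (y :: ys)

def sole_alt (sequence : List Int) : Option Int :=
  let groups := groupKeys sequence
  if groups.length = 1 then groups.head? else none

-- ===== PRECONDITION & SPEC =====
def Spec_sole (sequence : List Int) (out : Option Int) : Prop := out = sole_alt sequence
instance (sequence : List Int) (out : Option Int) : Decidable (Spec_sole sequence out) := by unfold Spec_sole; infer_instance

-- ===== CLAIM (what is proved, stated in full; the proofs are below) =====
def Claim_equal_sole : Prop := ∀ (sequence : List Int), Dom_sole sequence → Spec_sole sequence (sole sequence)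

-- ===== LEMMAS AND PROOFS =====

theorem soleGo_some (xs : List Int) (i : Nat) (r : Int) :
    soleGo xs (i + 1) (some r) = if xs.all (fun v => v = r) then some r else none := by
  induction xs generalizing i with
  | nil => simp [soleGo]
  | cons v rest ih =>
    simp only [soleGo, List.all_cons]
    by_cases h : v = r
    · subst h
      simpa using ih (i + 1)
    · simp [h]

theorem groupKeys_ne_nil (x : Int) (xs : List Int) : groupKeys (x :: xs) ≠ [] := by
  induction xs generalizing x with
  | nil => simp [groupKeys]
  | cons y ys ih =>
    simp only [groupKeys]
    split_ifs with h
    · exact ih y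
    · simp

theorem sole_alt_cons (x : Int) (xs : List Int) :
    sole_alt (x :: xs) = if xs.all (fun v => v = x) then some x else none := by
  induction xs generalizing x with
  | nil => simp [sole_alt, groupKeys]
  | cons y ys ih =>
    by_cases h : x = y
    · subst h
      have hstep : sole_alt (x :: x :: ys) = sole_alt (x :: ys) := by
        simp [sole_alt, groupKeys]
      rw [hstep, ih]
      simp
    · have hne := groupKeys_ne_nil y ys
      simp only [sole_alt, groupKeys, if_neg h]
      have hy : (y = x) = False := by simp [Ne.symm h]
      cases hgk : groupKeys (y :: ys) with
      | nil => exact absurd hgk hne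
      | cons a as => simp [hy]

-- ===== VERDICT (by name: the statement is the Claim_ definition above) =====
theorem sole_spec : Claim_equal_sole := by
  intro sequence _
  unfold Spec_sole
  cases sequence with
  | nil => simp [sole, soleGo, sole_alt, groupKeys]
  | cons x xs =>
    show soleGo (x :: xs) 0 none = _
    rw [sole_alt_cons]
    simp only [soleGo, if_true]
    exact soleGo_some xs 0 x
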